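-- pv_equiv track=rewrite | github.com/j-mye/gambling | poker_page/main.py | _engines_ui_order
-- ===== SOURCE A (Python) =====
-- def _engines_ui_order(hero: int) -> list[int]:
--     """Map engine seat index → fixed UI shell 0..5.
--
--     Slot 5 is always the hero (bottom center). Opponents use shells clockwise around
--     the oval from the hero's perspective: left center → top-left → top-center →
--     top-right → right center (first clockwise neighbor at left center).
--
--     Engine (hero+1) is the next seat in deal order and maps to that first shell.
--     """
--     h = int(hero) % 6
--     # UI slots in clockwise order around the felt (hero fixed at slot 5).
--     clockwise_shells = (4, 0, 1, 2, 3)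
--     order = [0] * 6
--     for k, ui_slot in enumerate(clockwise_shells):
--         order[ui_slot] = (h + 1 + k) % 6
--     order[5] = h
--     return order
-- ===== SOURCE B (Python) =====
-- def _engines_ui_order(hero: int) -> list[int]:
--     h = int(hero) % 6
--     # Walk the table in deal order starting at the hero, collecting the ring.
--     ring = [h]
--     while len(ring) < 6:
--         ring.append((ring[-1] + 1) % 6)
--     # Rearrange: opponents from the second clockwise neighbor fill slots 0..3,
--     # the first neighbor takes slot 4, the hero takes slot 5.
--     return ring[2:] + [ring[1], ring[0]]
-- ===== Notes on version B (the rewrite author's own statement) =====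
-- stated objective: alternative
-- what changed: B builds the deal-order ring iteratively by repeated successor steps from the hero (a while loop appending (last+1)%6) and then rearranges it by slicing (ring[2:] + [ring[1], ring[0]]), instead of A's scatter-write of (h+1+k)%6 into a pre-zeroed 6-list through the clockwise_shells inverse table.
import Mathlib
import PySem

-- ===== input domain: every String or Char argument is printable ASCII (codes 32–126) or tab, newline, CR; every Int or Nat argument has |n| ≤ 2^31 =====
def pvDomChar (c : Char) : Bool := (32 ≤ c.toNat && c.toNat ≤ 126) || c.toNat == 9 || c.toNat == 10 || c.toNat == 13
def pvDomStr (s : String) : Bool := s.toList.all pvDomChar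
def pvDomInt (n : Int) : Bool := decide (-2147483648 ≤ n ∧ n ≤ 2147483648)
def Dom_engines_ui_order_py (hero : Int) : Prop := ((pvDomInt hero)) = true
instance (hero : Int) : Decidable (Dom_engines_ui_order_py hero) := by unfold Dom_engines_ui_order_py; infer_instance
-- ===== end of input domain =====

-- B replaces A's scatter-write into a zeroed list with an iterative successor walk
-- building the deal-order ring, then a slice-based rearrangement; objective: alternative.

-- ===== PORT A =====
def engines_ui_order_py (hero : Int) : List Int :=
  let h := PySem.Int.mod hero 6
  let clockwise_shells : List Int := [4, 0, 1, 2, 3]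
  let order : List Int := List.replicate 6 0
  -- for k, ui_slot in enumerate(clockwise_shells): order[ui_slot] = (h + 1 + k) % 6
  -- (indices 0..4 are in range, so the assignment order[ui_slot] = … is exact as pySetD)
  let order := (PySem.List.enumerate clockwise_shells).foldl
    (fun order kui => PySem.List.pySetD order kui.2 (PySem.Int.mod (h + 1 + kui.1) 6)) order
  PySem.List.pySetD order 5 h

-- ===== PORT B =====
-- 'while len(ring) < 6: ring.append((ring[-1] + 1) % 6)': the loop adds one element per
-- iteration, so fuel 6 is exact (the loop body runs at most 5 times).
def pvRingLoop : Nat → List Int → List Int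
  | 0, ring => ring
  | fuel + 1, ring =>
      if ring.length < 6 then
        pvRingLoop fuel (ring ++ [PySem.Int.mod (PySem.List.pyGetD ring (-1) 0 + 1) 6])
      else ring

def engines_ui_order_py_alt (hero : Int) : List Int :=
  let h := PySem.Int.mod hero 6
  let ring := pvRingLoop 6 [h]
  -- ring[2:] + [ring[1], ring[0]]  (ring has length 6, so the indexed reads are in range)
  PySem.List.slice ring (some 2) none ++
    [PySem.List.pyGetD ring 1 0, PySem.List.pyGetD ring 0 0]

-- ===== PRECONDITION & SPEC =====
def Spec_engines_ui_order_py (hero : Int) (out : List Int) : Prop := out = engines_ui_order_py_alt hero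
instance (hero : Int) (out : List Int) : Decidable (Spec_engines_ui_order_py hero out) := by unfold Spec_engines_ui_order_py; infer_instance

-- ===== CLAIM =====
def Claim_equal_engines_ui_order_py : Prop := ∀ (hero : Int), Dom_engines_ui_order_py hero → Spec_engines_ui_order_py hero (engines_ui_order_py hero)

-- ===== LEMMAS AND PROOFS =====

-- Both ports depend on hero only through h = hero % 6, which is idempotent.
theorem pv_mod_idem (a : Int) : PySem.Int.mod (PySem.Int.mod a 6) 6 = PySem.Int.mod a 6 := by
  rw [PySem.Int.mod_eq_emod_of_pos (by norm_num), PySem.Int.mod_eq_emod_of_pos (by norm_num)]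
  exact Int.emod_emod_of_dvd a (dvd_refl 6)

theorem pv_A_reduce (hero : Int) :
    engines_ui_order_py hero = engines_ui_order_py (PySem.Int.mod hero 6) := by
  simp only [engines_ui_order_py, pv_mod_idem]

theorem pv_B_reduce (hero : Int) :
    engines_ui_order_py_alt hero = engines_ui_order_py_alt (PySem.Int.mod hero 6) := by
  simp only [engines_ui_order_py_alt, pv_mod_idem]

theorem pv_eq_on_canon (r : Int) (h0 : 0 ≤ r) (h6 : r < 6) :
    engines_ui_order_py r = engines_ui_order_py_alt r := by
  interval_cases r <;> decide

-- ===== VERDICT =====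
theorem engines_ui_order_py_spec : Claim_equal_engines_ui_order_py := by
  intro hero _
  unfold Spec_engines_ui_order_py
  rw [pv_A_reduce, pv_B_reduce]
  exact pv_eq_on_canon _ (PySem.Int.mod_nonneg hero (by norm_num))
    (PySem.Int.mod_lt hero (by norm_num))
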